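-- pv_equiv track=rewrite | github.com/zbz1999/tijiao | RQ3/开发者工作类型.py | is_generic_email
-- ===== SOURCE A (Python) =====
-- def is_generic_email(email):
--     """检测是否为通用/匿名邮箱"""
--     generic_domains = [
--         'users.noreply.github.com',
--         'example.com',
--         'gmail.com',
--         'hotmail.com'
--     ]
--     return any(email.endswith(f'@{d}') for d in generic_domains)
-- ===== SOURCE B (Python) =====
-- GENERIC_DOMAINS = frozenset({
--     'users.noreply.github.com',
--     'example.com',
--     'gmail.com',
--     'hotmail.com'
-- })
--
--
-- def is_generic_email(email):
--     """检测是否为通用/匿名邮箱"""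
--     _local, sep, domain = email.rpartition('@')
--     return sep == '@' and domain in GENERIC_DOMAINS
-- ===== Notes on version B (the rewrite author's own statement) =====
-- stated objective: idiomatic
-- what changed: Instead of testing email.endswith('@'+d) for each of the four domains, B extracts the part after the last '@' once with rpartition and does a single membership test in a frozenset.
import Mathlib
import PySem

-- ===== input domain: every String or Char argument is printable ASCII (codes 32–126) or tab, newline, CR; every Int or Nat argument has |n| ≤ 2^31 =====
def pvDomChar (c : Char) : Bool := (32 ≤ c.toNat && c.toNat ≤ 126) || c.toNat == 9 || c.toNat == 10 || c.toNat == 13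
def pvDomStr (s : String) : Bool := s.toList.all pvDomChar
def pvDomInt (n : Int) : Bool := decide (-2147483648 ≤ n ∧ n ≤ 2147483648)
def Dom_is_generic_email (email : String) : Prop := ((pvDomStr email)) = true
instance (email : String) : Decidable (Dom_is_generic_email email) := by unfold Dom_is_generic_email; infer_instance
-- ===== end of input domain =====

-- B replaces A's per-domain endswith('@'+d) loop by one rpartition('@') and a single set lookup (idiomatic; same return value).

-- ===== PORT A =====
def genericDomainsA : List String :=
  ["users.noreply.github.com", "example.com", "gmail.com", "hotmail.com"]

def is_generic_email (email : String) : Bool :=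
  genericDomainsA.any (fun d => PySem.Str.endswith email ("@" ++ d))

-- ===== PORT B =====
def genericDomainsSet : List String :=
  ["users.noreply.github.com", "example.com", "gmail.com", "hotmail.com"]

-- hand port of str.rpartition(email, '@'): exact for this single-character separator —
-- scanning from the right for '@' is takeWhile (· ≠ '@') on the reversed character list
def pyRPartitionAt (email : String) : String × String × String :=
  let r := email.toList.reverse
  let tail := (r.takeWhile (fun c => !(c == '@'))).reverse
  if tail.length < r.length then
    (String.ofList (email.toList.take (r.length - tail.length - 1)), "@", String.ofList tail)
  else ("", "", email)

def is_generic_email_alt (email : String) : Bool :=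
  let p := pyRPartitionAt email
  p.2.1 == "@" && genericDomainsSet.contains p.2.2

-- ===== PRECONDITION & SPEC =====
def Spec_is_generic_email (email : String) (out : Bool) : Prop := out = is_generic_email_alt email
instance (email : String) (out : Bool) : Decidable (Spec_is_generic_email email out) := by unfold Spec_is_generic_email; infer_instance

-- ===== CLAIM (what is proved, stated in full; the proofs are below) =====
def Claim_equal_is_generic_email : Prop := ∀ (email : String), Dom_is_generic_email email → Spec_is_generic_email email (is_generic_email email)

-- ===== LEMMAS AND PROOFS =====

-- characterisation: for a pattern d free of '@', "d then '@'" is a prefix of r iff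
-- the '@'-free initial segment of r is exactly d and r is longer than d
theorem prefix_append_at_iff (d : List Char) (hd : ∀ c ∈ d, c ≠ '@') :
    ∀ r : List Char, ((d ++ ['@']) <+: r ↔ (r.takeWhile (fun c => !(c == '@')) = d ∧ d.length < r.length)) := by
  induction d with
  | nil =>
    intro r
    cases r with
    | nil => simp
    | cons c t =>
      simp only [List.nil_append, List.takeWhile_cons]
      by_cases hc : c = '@'
      · subst hc
        simp [List.cons_prefix_cons]
      · simp [hc, List.cons_prefix_cons]
        intro h; exact absurd h.symm hc
  | cons a d ih =>
    intro r
    have ha : a ≠ '@' := hd a (by simp)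
    have hd' : ∀ c ∈ d, c ≠ '@' := fun c hc => hd c (by simp [hc])
    cases r with
    | nil => simp
    | cons c t =>
      simp only [List.cons_append, List.cons_prefix_cons, List.takeWhile_cons]
      by_cases hc : c = '@'
      · subst hc
        constructor
        · rintro ⟨h, -⟩; exact absurd h ha
        · rintro ⟨h, -⟩; simp at h
      · simp only [if_pos (show (!(c == '@')) = true by simp [hc])]
        constructor
        · rintro ⟨rfl, h⟩
          have h2 := (ih hd' t).mp h
          exact ⟨by rw [h2.1], by simpa using h2.2⟩
        · rintro ⟨h, hlen⟩
          have h1 := List.cons.inj h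
          exact ⟨h1.1.symm, (ih hd' t).mpr ⟨h1.2, by simpa using hlen⟩⟩

-- per-domain bridge: A's endswith test equals B's "found '@' and tail-after-it = d" test
theorem endswith_at_iff (email d : String) (hd : ∀ c ∈ d.toList, c ≠ '@') :
    (PySem.Str.endswith email ("@" ++ d) = true) ↔
      ((email.toList.reverse.takeWhile (fun c => !(c == '@'))).length < email.toList.reverse.length ∧
        (email.toList.reverse.takeWhile (fun c => !(c == '@'))).reverse = d.toList) := by
  have h1 : PySem.Str.endswith email ("@" ++ d) = true ↔ ("@" ++ d).toList <:+ email.toList := by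
    simp [PySem.Chars.endswith_iff]
  have h2 : ("@" ++ d).toList = '@' :: d.toList := by
    simp [String.toList_append]
  rw [h1, h2, ← List.reverse_prefix]
  have h3 : ('@' :: d.toList).reverse = d.toList.reverse ++ ['@'] := by simp
  rw [h3, prefix_append_at_iff d.toList.reverse (by intro c hc; exact hd c (by simpa using hc))]
  constructor
  · rintro ⟨h, hl⟩
    exact ⟨by rw [h]; simpa using hl, by rw [h]; simp⟩
  · rintro ⟨hl, h⟩
    have h4 : email.toList.reverse.takeWhile (fun c => !(c == '@')) = d.toList.reverse := by
      have := congrArg List.reverse h; simpa using this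
    exact ⟨h4, by rw [← h4]; simpa using hl⟩

theorem string_ofList_eq_iff (l : List Char) (s : String) : (String.ofList l = s) ↔ l = s.toList := by
  constructor
  · intro h; subst h; simp
  · intro h; subst h; simp

-- ===== VERDICT (by name: the statement is the Claim_ definition above) =====
theorem is_generic_email_spec : Claim_equal_is_generic_email := by
  intro email _
  unfold Spec_is_generic_email is_generic_email is_generic_email_alt pyRPartitionAt genericDomainsA genericDomainsSet
  simp only [List.any_cons, List.any_nil]
  set t := List.takeWhile (fun c => !c == '@') email.toList.reverse with ht
  by_cases hfound : t.reverse.length < email.toList.reverse.length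
  · rw [if_pos hfound]
    have hf : t.length < email.toList.reverse.length := by simpa using hfound
    have key : ∀ d : String, (∀ c ∈ d.toList, c ≠ '@') →
        (PySem.Str.endswith email ("@" ++ d) = true ↔ t.reverse = d.toList) := by
      intro d hd
      rw [endswith_at_iff email d hd]
      exact ⟨fun h => h.2, fun h => ⟨hf, h⟩⟩
    have e1 := key "users.noreply.github.com" (by simp)
    have e2 := key "example.com" (by simp)
    have e3 := key "gmail.com" (by simp)
    have e4 := key "hotmail.com" (by simp)
    apply Bool.coe_iff_coe.mp
    simp only [List.contains_cons, List.contains_nil, Bool.or_eq_true, Bool.and_eq_true,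
      beq_iff_eq, Bool.false_eq_true, or_false, true_and]
    rw [e1, e2, e3, e4]
    simp only [string_ofList_eq_iff]
  · rw [if_neg hfound]
    have hf : ¬ t.length < email.toList.reverse.length := by simpa using hfound
    have hnone : ∀ d : String, (∀ c ∈ d.toList, c ≠ '@') →
        PySem.Str.endswith email ("@" ++ d) = false := by
      intro d hd
      rw [Bool.eq_false_iff]
      intro h
      exact hf ((endswith_at_iff email d hd).mp h).1
    rw [hnone "users.noreply.github.com" (by simp), hnone "example.com" (by simp),
      hnone "gmail.com" (by simp), hnone "hotmail.com" (by simp)]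
    simp
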